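-- pv_equiv track=rewrite | github.com/amoilanen/advent-of-code-2025 | internal/days/day04/day04.py | count_removable_rolls
-- ===== SOURCE A (Python) =====
-- def is_accessible(grid: list[list[int]], row: int, col: int) -> bool:
--     """
--     Check if a paper roll at the given position is accessible by a forklift.
--
--     A roll is accessible if it has fewer than 4 rolls in the 8 adjacent positions.
--
--     Args:
--         grid: The grid of paper roll locations (1 = roll, 0 = empty)
--         row: Row index of the roll to check
--         col: Column index of the roll to check
--
--     Returns:
--         True if the roll is accessible, False otherwise
--     """
--     # Directions for 8 adjacent positions: N, NE, E, SE, S, SW, W, NW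
--     directions = [
--         (-1, -1), (-1, 0), (-1, 1),
--         (0, -1),           (0, 1),
--         (1, -1),  (1, 0),  (1, 1)
--     ]
--
--     neighbor_count = 0
--
--     for dr, dc in directions:
--         new_row = row + dr
--         new_col = col + dc
--
--         # Check bounds
--         if 0 <= new_row < len(grid) and 0 <= new_col < len(grid[new_row]):
--             neighbor_count += grid[new_row][new_col]
--             # Early exit optimization: if we already have 4+ neighbors, not accessible
--             if neighbor_count >= 4:
--                 return False
--
--     return True
--
-- def count_removable_rolls(grid: list[list[int]]) -> int:
--     """
--     Count how many paper rolls can be removed in total by iteratively removing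
--     accessible rolls until none remain.
--
--     Algorithm:
--     1. Make a copy of the grid
--     2. Track all positions with rolls in a set
--     3. Loop:
--        - Find all currently accessible rolls (only check tracked positions)
--        - If none, stop
--        - Remove them (set to 0)
--        - Update tracked positions
--        - Add count to total
--     4. Return total count
--
--     Args:
--         grid: The grid of paper roll locations (1 = roll, 0 = empty)
--
--     Returns:
--         Total number of rolls that can be removed
--     """
--     if not grid:
--         return 0
--
--     # Create a copy of the grid
--     mutable_grid = [row[:] for row in grid]
--
--     # Track all positions with rolls for faster iteration
--     roll_positions = set()
--     for row in range(len(mutable_grid)):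
--         for col in range(len(mutable_grid[row])):
--             if mutable_grid[row][col] == 1:
--                 roll_positions.add((row, col))
--
--     total_removed = 0
--
--     while roll_positions:
--         # Find all accessible rolls (only check positions we know have rolls)
--         accessible_positions = []
--
--         for row, col in roll_positions:
--             if is_accessible(mutable_grid, row, col):
--                 accessible_positions.append((row, col))
--
--         # If no accessible rolls found, we're done
--         if not accessible_positions:
--             break
--
--         # Remove all accessible rolls
--         for row, col in accessible_positions:
--             mutable_grid[row][col] = 0
--             roll_positions.remove((row, col))
--
--         # Add to total count
--         total_removed += len(accessible_positions)
--
--     return total_removed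
-- ===== SOURCE B (Python) =====
-- def is_accessible(grid: list[list[int]], row: int, col: int) -> bool:
--     """A roll is accessible if its 8-neighbour values never sum to 4 or more
--     (same early-exit prefix rule as the original helper)."""
--     directions = [
--         (-1, -1), (-1, 0), (-1, 1),
--         (0, -1),           (0, 1),
--         (1, -1),  (1, 0),  (1, 1)
--     ]
--     neighbor_count = 0
--     for dr, dc in directions:
--         new_row = row + dr
--         new_col = col + dc
--         if 0 <= new_row < len(grid) and 0 <= new_col < len(grid[new_row]):
--             neighbor_count += grid[new_row][new_col]
--             if neighbor_count >= 4:
--                 return False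
--     return True
--
--
-- def count_removable_rolls(grid: list[list[int]]) -> int:
--     """Worklist peeling: remove rolls one at a time; when a roll is removed,
--     only its neighbours can become accessible, so re-examine just those."""
--     if not grid:
--         return 0
--     g = [row[:] for row in grid]
--     directions = [
--         (-1, -1), (-1, 0), (-1, 1),
--         (0, -1),           (0, 1),
--         (1, -1),  (1, 0),  (1, 1)
--     ]
--     stack = [(r, c) for r in range(len(g)) for c in range(len(g[r])) if g[r][c] == 1]
--     removed = 0
--     while stack:
--         r, c = stack.pop()
--         if g[r][c] == 1 and is_accessible(g, r, c):
--             g[r][c] = 0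
--             removed += 1
--             for dr, dc in directions:
--                 nr, nc = r + dr, c + dc
--                 if 0 <= nr < len(g) and 0 <= nc < len(g[nr]) and g[nr][nc] == 1:
--                     stack.append((nr, nc))
--     return removed
-- ===== Notes on version B (the rewrite author's own statement) =====
-- stated objective: alternative
-- what changed: A repeatedly rescans every remaining roll once per removal wave until a wave is empty; B does a single worklist peeling that removes rolls one at a time and re-examines only the 8 neighbours of a removed roll.
import Mathlib
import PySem

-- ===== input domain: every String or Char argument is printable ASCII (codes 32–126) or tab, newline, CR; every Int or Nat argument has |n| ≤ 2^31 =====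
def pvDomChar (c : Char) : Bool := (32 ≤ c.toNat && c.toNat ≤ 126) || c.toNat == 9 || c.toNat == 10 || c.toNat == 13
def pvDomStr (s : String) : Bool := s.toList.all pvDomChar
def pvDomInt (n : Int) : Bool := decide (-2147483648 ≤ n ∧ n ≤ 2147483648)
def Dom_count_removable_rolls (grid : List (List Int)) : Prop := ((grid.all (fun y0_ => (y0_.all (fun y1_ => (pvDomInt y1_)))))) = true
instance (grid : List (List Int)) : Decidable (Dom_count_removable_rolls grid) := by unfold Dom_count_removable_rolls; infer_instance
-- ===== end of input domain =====

-- B replaces A's wave-by-wave rescans of the remaining rolls by a single worklist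
-- peeling: rolls are removed one at a time and each removal re-examines only the 8
-- neighbours of the removed roll.  Equality of the return values is proved for ALL grids.

-- ===== PORT A =====

-- the 8 neighbour directions (module-level constant `directions`)
def pvDirs : List (Int × Int) := [(-1,-1),(-1,0),(-1,1),(0,-1),(0,1),(1,-1),(1,0),(1,1)]

-- grid[r]  (Python indexing; rows reached here are always checked in range first)
def pvRowAt (g : List (List Int)) (r : Int) : List Int := (PySem.List.pyGet? g r).getD []

-- grid[r][c]  (Python indexing; always guarded in range where it matters)
def pvCell (g : List (List Int)) (p : Int × Int) : Int :=
  (PySem.List.pyGet? (pvRowAt g p.1) p.2).getD 0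

-- grid[r][c] = 0  (in-place assignment on the mutable copy)
def pvZero (g : List (List Int)) (r c : Int) : List (List Int) :=
  PySem.List.pySetD g r (PySem.List.pySetD (pvRowAt g r) c 0)

-- the `for dr, dc in directions` loop of is_accessible, with its early exit
def isAccGo (grid : List (List Int)) (row col : Int) : List (Int × Int) → Int → Bool
  | [], _ => true
  | d :: rest, cnt =>
      let nr := row + d.1
      let nc := col + d.2
      if 0 ≤ nr ∧ nr < (grid.length : Int) ∧ 0 ≤ nc ∧ nc < ((pvRowAt grid nr).length : Int) then
        let cnt' := cnt + pvCell grid (nr, nc)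
        if 4 ≤ cnt' then false else isAccGo grid row col rest cnt'
      else isAccGo grid row col rest cnt

def is_accessible (grid : List (List Int)) (row col : Int) : Bool :=
  isAccGo grid row col pvDirs 0

-- termination helpers for aLoop (cited in its decreasing_by)
theorem pv_discard_length_le {α : Type} [BEq α] (s : List α) (x : α) :
    (PySem.Set.discard s x).length ≤ s.length := by
  simpa [PySem.Set.discard] using List.length_filter_le _ s

theorem pv_foldl_discard_le {α : Type} [BEq α] (l : List α) (s : List α) :
    (l.foldl (fun s p => PySem.Set.discard s p) s).length ≤ s.length := by
  induction l generalizing s with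
  | nil => simp
  | cons x t ih => exact le_trans (ih _) (pv_discard_length_le s x)

theorem pv_discard_length_lt {α : Type} [BEq α] [LawfulBEq α] (s : List α) (x : α)
    (h : x ∈ s) : (PySem.Set.discard s x).length < s.length := by
  have : ∃ y ∈ s, ¬ ((!(y == x)) = true) := ⟨x, h, by simp⟩
  simpa [PySem.Set.discard] using List.length_filter_lt_length_iff_exists.mpr this

-- the accessible-positions pass, the removal pass and the set-removal pass of A's loop body
def pvAccOf (mg : List (List Int)) (rolls : List (Int × Int)) : List (Int × Int) :=
  rolls.foldl (fun l p => if is_accessible mg p.1 p.2 then l ++ [p] else l) []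

def pvZeroAll (mg : List (List Int)) (ps : List (Int × Int)) : List (List Int) :=
  ps.foldl (fun g p => pvZero g p.1 p.2) mg

def pvRemoveAll (rolls ps : List (Int × Int)) : List (Int × Int) :=
  ps.foldl (fun s p => PySem.Set.discard s p) rolls

theorem pvALoop_dec (mg : List (List Int)) (rolls : List (Int × Int))
    (h : pvAccOf mg rolls ≠ []) :
    (pvRemoveAll rolls (pvAccOf mg rolls)).length < rolls.length := by
  have hacc : pvAccOf mg rolls = rolls.filter (fun p => is_accessible mg p.1 p.2) := by
    simpa [pvAccOf] using
      PySem.List.foldl_append_if_eq_filter (fun p : Int × Int => is_accessible mg p.1 p.2) rolls []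
  unfold pvRemoveAll
  rw [hacc] at h ⊢
  obtain ⟨p, t, hpt⟩ := List.exists_cons_of_ne_nil h
  have hp : p ∈ rolls := by
    have : p ∈ rolls.filter (fun p => is_accessible mg p.1 p.2) := by
      rw [hpt]; exact List.mem_cons_self
    exact List.mem_of_mem_filter this
  rw [hpt]
  simp only [List.foldl_cons]
  exact lt_of_le_of_lt (pv_foldl_discard_le t _) (pv_discard_length_lt rolls p hp)

-- the `while roll_positions:` loop of A
def aLoop (mg : List (List Int)) (rolls : PySem.Set (Int × Int)) (total : Int) : Int :=
  if rolls = [] then total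
  else
    -- for row, col in roll_positions: if is_accessible: append  (count is order-independent)
    let acc := pvAccOf mg rolls
    if h : acc = [] then total
    else
      -- for row, col in accessible_positions: grid[row][col] = 0; roll_positions.remove(...)
      -- (the two independent updates of the one Python loop, as two folds;
      --  set.remove of a present element = Set.discard)
      aLoop (pvZeroAll mg acc) (pvRemoveAll rolls acc) (total + (acc.length : Int))
termination_by rolls.length
decreasing_by
  exact pvALoop_dec mg rolls h

def count_removable_rolls (grid : List (List Int)) : Int :=
  if grid = [] then 0
  else
    -- mutable_grid = [row[:] for row in grid]
    let mg := grid.map (fun row => PySem.List.slice row none none)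
    -- roll_positions built by the two nested range loops
    let rolls : PySem.Set (Int × Int) :=
      (PySem.List.pyRange 0 (mg.length : Int) 1).foldl (fun s r =>
        (PySem.List.pyRange 0 ((pvRowAt mg r).length : Int) 1).foldl (fun s c =>
          if pvCell mg (r, c) = 1 then PySem.Set.add s (r, c) else s) s) PySem.Set.empty
    aLoop mg rolls 0

-- ===== PORT B =====

-- termination measure for bLoop: how many cells of the grid hold a 1
def pvOnes (g : List (List Int)) : Nat := (g.map (fun row => row.count 1)).sum

theorem pvIdx_lt {n : Nat} {i : Int} {k : Nat} (h : PySem.List.pyIdx? n i = some k) :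
    k < n := by
  unfold PySem.List.pyIdx? at h; split_ifs at h <;> simp_all <;> omega

theorem pv_sum_set_lt (l : List Nat) (k : Nat) (x : Nat) (hk : k < l.length)
    (hx : x < l[k]) : (l.set k x).sum < l.sum := by
  induction l generalizing k with
  | nil => simp at hk
  | cons a t ih =>
    cases k with
    | zero => simp at hx ⊢; omega
    | succ k =>
      simp only [List.set_cons_succ, List.sum_cons]
      have := ih k (by simpa using hk) (by simpa using hx)
      omega

theorem pv_count_set_lt (row : List Int) (j : Nat) (hj : j < row.length)
    (h1 : row[j] = 1) : (row.set j 0).count 1 < row.count 1 := by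
  induction row generalizing j with
  | nil => simp at hj
  | cons a t ih =>
    cases j with
    | zero =>
      simp at h1; subst h1
      simp [List.count_cons]
    | succ j =>
      simp only [List.set_cons_succ, List.count_cons]
      have := ih j (by simpa using hj) (by simpa using h1)
      split_ifs <;> omega

theorem pvOnes_zero_lt (g : List (List Int)) (r c : Int) (h : pvCell g (r, c) = 1) :
    pvOnes (pvZero g r c) < pvOnes g := by
  cases hk : PySem.List.pyIdx? g.length r with
  | none =>
    exfalso
    unfold pvCell pvRowAt PySem.List.pyGet? at h
    simp only [hk, Option.bind_none, Option.getD_none] at h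
    unfold PySem.List.pyIdx? at h
    split_ifs at h <;> simp_all <;> omega
  | some k =>
    have hk2 : k < g.length := pvIdx_lt hk
    have hrow : pvRowAt g r = g[k] := by
      simp [pvRowAt, PySem.List.pyGet?, hk, List.getElem?_eq_getElem hk2]
    unfold pvCell at h
    rw [hrow] at h
    cases hj : PySem.List.pyIdx? (g[k].length) c with
    | none =>
      exfalso
      unfold PySem.List.pyGet? at h
      simp [hj] at h
    | some j =>
      have hj2 : j < g[k].length := pvIdx_lt hj
      have hcell : g[k][j] = 1 := by
        unfold PySem.List.pyGet? at h
        simpa [hj, List.getElem?_eq_getElem hj2] using h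
      have hz : pvZero g r c = g.set k (g[k].set j 0) := by
        unfold pvZero PySem.List.pySetD PySem.List.pySet?
        rw [hrow]
        simp [hk, hj]
      rw [hz]
      unfold pvOnes
      rw [List.map_set]
      refine pv_sum_set_lt _ k _ (by simpa using hk2) ?_
      rw [List.getElem_map]
      exact pv_count_set_lt _ j hj2 hcell

theorem pv_pop_rest_lt {α : Type} (stack rest : List α) (p : α)
    (h : PySem.List.pop? stack = some (p, rest)) : rest.length < stack.length := by
  have := PySem.List.length_of_pop?_eq_some stack h
  simp only at this
  omega

-- the `while stack:` loop of B
def bLoop (g : List (List Int)) (stack : List (Int × Int)) (removed : Int) : Int :=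
  match hpop : PySem.List.pop? stack with
  | none => removed
  | some (p, rest) =>
    if hc : pvCell g p = 1 ∧ is_accessible g p.1 p.2 then
      let g' := pvZero g p.1 p.2
      bLoop g'
        (pvDirs.foldl (fun s d =>
          let nr := p.1 + d.1
          let nc := p.2 + d.2
          if 0 ≤ nr ∧ nr < (g'.length : Int) ∧ 0 ≤ nc ∧ nc < ((pvRowAt g' nr).length : Int) ∧
              pvCell g' (nr, nc) = 1
          then s ++ [(nr, nc)] else s) rest)
        (removed + 1)
    else bLoop g rest removed
termination_by (pvOnes g, stack.length)
decreasing_by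
  · exact Prod.Lex.left _ _ (pvOnes_zero_lt g p.1 p.2 (by simpa using hc.1))
  · exact Prod.Lex.right _ (pv_pop_rest_lt stack rest p hpop)

def count_removable_rolls_alt (grid : List (List Int)) : Int :=
  if grid = [] then 0
  else
    -- g = [row[:] for row in grid]
    let g := grid.map (fun row => PySem.List.slice row none none)
    -- stack = [(r, c) for r in range(len(g)) for c in range(len(g[r])) if g[r][c] == 1]
    let stack : List (Int × Int) :=
      (PySem.List.pyRange 0 (g.length : Int) 1).flatMap (fun r =>
        (PySem.List.pyRange 0 ((pvRowAt g r).length : Int) 1).flatMap (fun c =>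
          if pvCell g (r, c) = 1 then [(r, c)] else []))
    bLoop g stack 0

-- ===== PRECONDITION & SPEC =====
def Spec_count_removable_rolls (grid : List (List Int)) (out : Int) : Prop := out = count_removable_rolls_alt grid
instance (grid : List (List Int)) (out : Int) : Decidable (Spec_count_removable_rolls grid out) := by unfold Spec_count_removable_rolls; infer_instance

-- ===== CLAIM (what is proved, stated in full; the proofs are below) =====
def Claim_equal_count_removable_rolls : Prop := ∀ (grid : List (List Int)), Dom_count_removable_rolls grid → Spec_count_removable_rolls grid (count_removable_rolls grid)

-- ===== LEMMAS AND PROOFS =====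
-- basic facts about Python indexing used by both ports ---------------------

-- in-bounds (with nonnegative indices) — exactly the guard both ports test
def pvInB (g : List (List Int)) (p : Int × Int) : Prop :=
  0 ≤ p.1 ∧ p.1 < (g.length : Int) ∧ 0 ≤ p.2 ∧ p.2 < ((pvRowAt g p.1).length : Int)

-- p is a roll of the original grid
def pvRoll (G : List (List Int)) (p : Int × Int) : Prop := pvInB G p ∧ pvCell G p = 1

def pvSound (G : List (List Int)) (R : List (Int × Int)) : Prop :=
  R.Nodup ∧ ∀ p ∈ R, pvRoll G p

-- R is a legal peeling order: each removed roll was accessible when removed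
inductive pvReach (G : List (List Int)) : List (Int × Int) → Prop
  | nil : pvReach G []
  | snoc {R : List (Int × Int)} {p : Int × Int} : pvReach G R → pvRoll G p → p ∉ R →
      is_accessible (pvZeroAll G R) p.1 p.2 = true → pvReach G (R ++ [p])

-- no remaining roll is accessible
def pvFinal (G : List (List Int)) (T : List (Int × Int)) : Prop :=
  pvSound G T ∧ ∀ p, pvRoll G p → p ∉ T → is_accessible (pvZeroAll G T) p.1 p.2 = false

theorem pvIdx_nonneg {n : Nat} {i : Int} (h0 : 0 ≤ i) (h1 : i < (n : Int)) :
    PySem.List.pyIdx? n i = some i.toNat := by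
  unfold PySem.List.pyIdx?; split_ifs <;> simp_all

theorem pvRowAt_of_nonneg {g : List (List Int)} {r : Int} (h0 : 0 ≤ r) :
    pvRowAt g r = g.getD r.toNat [] := by
  by_cases h1 : r < (g.length : Int)
  · simp [pvRowAt, PySem.List.pyGet?, pvIdx_nonneg h0 h1, List.getD_eq_getElem?_getD]
  · have hle : g.length ≤ r.toNat := by omega
    have hn : PySem.List.pyIdx? g.length r = none := by
      unfold PySem.List.pyIdx?; rw [if_pos h0, if_neg h1]
    simp [pvRowAt, PySem.List.pyGet?, hn, List.getD_eq_getElem?_getD,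
      List.getElem?_eq_none hle]

theorem pvCell_of_nonneg {g : List (List Int)} {p : Int × Int} (h0 : 0 ≤ p.1) (h2 : 0 ≤ p.2) :
    pvCell g p = (g.getD p.1.toNat []).getD p.2.toNat 0 := by
  unfold pvCell
  rw [pvRowAt_of_nonneg h0]
  set row := g.getD p.1.toNat []
  by_cases h3 : p.2 < (row.length : Int)
  · simp [PySem.List.pyGet?, pvIdx_nonneg h2 h3, List.getD_eq_getElem?_getD]
  · have hle : row.length ≤ p.2.toNat := by omega
    have hn : PySem.List.pyIdx? row.length p.2 = none := by
      unfold PySem.List.pyIdx?; rw [if_pos h2, if_neg h3]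
    simp [PySem.List.pyGet?, hn, List.getD_eq_getElem?_getD,
      List.getElem?_eq_none hle]

theorem pvZero_of_nonneg {r c : Int} (g : List (List Int)) (hr : 0 ≤ r) (hc : 0 ≤ c) :
    pvZero g r c = g.set r.toNat ((pvRowAt g r).set c.toNat 0) := by
  unfold pvZero
  rw [PySem.List.pySetD_of_nonneg _ _ hr, PySem.List.pySetD_of_nonneg _ _ hc]

-- same outer length and same length of every row
def pvSameShape (g g' : List (List Int)) : Prop :=
  g.length = g'.length ∧ ∀ i : Int, (pvRowAt g i).length = (pvRowAt g' i).length

theorem pvShape_zero (g : List (List Int)) (r c : Int) : pvSameShape g (pvZero g r c) := by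
  cases h : PySem.List.pyIdx? g.length r with
  | none =>
    have : pvZero g r c = g := by
      simp [pvZero, PySem.List.pySetD, PySem.List.pySet?, h]
    rw [this]; exact ⟨rfl, fun _ => rfl⟩
  | some k =>
    have hk : k < g.length := pvIdx_lt h
    have hrow : pvRowAt g r = g[k] := by
      simp [pvRowAt, PySem.List.pyGet?, h, List.getElem?_eq_getElem hk]
    have hz : pvZero g r c = g.set k (PySem.List.pySetD (pvRowAt g r) c 0) := by
      simp [pvZero, PySem.List.pySetD, PySem.List.pySet?, h]
    rw [hz]
    refine ⟨by simp, fun i => ?_⟩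
    unfold pvRowAt PySem.List.pyGet?
    simp only [List.length_set]
    cases hi : PySem.List.pyIdx? g.length i with
    | none => simp
    | some m =>
      have hm : m < g.length := pvIdx_lt hi
      by_cases hmk : k = m
      · subst hmk
        simp [List.getElem?_set, hk, PySem.List.length_pySetD, h,
          List.getElem?_eq_getElem hk]
      · simp [List.getElem?_set, hmk]

theorem pvCell_zero {g : List (List Int)} {p q : Int × Int}
    (hp : pvInB g p) (hq : pvInB g q) :
    pvCell (pvZero g p.1 p.2) q = if q = p then 0 else pvCell g q := by
  obtain ⟨hp1, hp2, hp3, hp4⟩ := hp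
  obtain ⟨hq1, hq2, hq3, hq4⟩ := hq
  rw [pvRowAt_of_nonneg hp1] at hp4
  rw [pvRowAt_of_nonneg hq1] at hq4
  simp only [List.getD_eq_getElem?_getD] at hp4 hq4
  rw [pvZero_of_nonneg g hp1 hp3, pvCell_of_nonneg hq1 hq3, pvCell_of_nonneg hq1 hq3,
    pvRowAt_of_nonneg hp1]
  simp only [List.getD_eq_getElem?_getD, List.getElem?_set]
  by_cases h1 : p.1.toNat = q.1.toNat
  · simp only [if_pos h1, if_pos (by omega : p.1.toNat < g.length)]
    have hq1p : q.1 = p.1 := by omega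
    by_cases h2 : p.2.toNat = q.2.toNat
    · have hqp : q = p := Prod.ext (by omega) (by omega)
      simp only [Option.getD_some, List.getElem?_set, if_pos h2, if_pos hqp]
      simp only [if_pos (show p.2.toNat < (g[p.1.toNat]?.getD []).length by omega)]
      simp
    · have hqp : ¬ (q = p) := by
        intro hh; apply h2; rw [hh]
      simp only [Option.getD_some, List.getElem?_set, if_neg h2, if_neg hqp, ← h1]
  · have hqp : ¬ (q = p) := by
      intro hh; apply h1; rw [hh]
    simp only [if_neg h1, if_neg hqp]

theorem pvShape_symm {g g' : List (List Int)} (h : pvSameShape g g') : pvSameShape g' g :=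
  ⟨h.1.symm, fun i => (h.2 i).symm⟩

theorem pvShape_trans {g g' g'' : List (List Int)} (h : pvSameShape g g')
    (h' : pvSameShape g' g'') : pvSameShape g g'' :=
  ⟨h.1.trans h'.1, fun i => (h.2 i).trans (h'.2 i)⟩

theorem pvInB_congr {g g' : List (List Int)} {p : Int × Int} (h : pvSameShape g g') :
    pvInB g p ↔ pvInB g' p := by
  unfold pvInB; rw [h.1, h.2 p.1]

theorem pvZeroAll_append (g : List (List Int)) (R S : List (Int × Int)) :
    pvZeroAll g (R ++ S) = pvZeroAll (pvZeroAll g R) S := by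
  simp [pvZeroAll, List.foldl_append]

theorem pvZeroAll_singleton (g : List (List Int)) (p : Int × Int) :
    pvZeroAll g [p] = pvZero g p.1 p.2 := rfl

theorem pvShape_zeroAll (g : List (List Int)) (R : List (Int × Int)) :
    pvSameShape g (pvZeroAll g R) := by
  induction R generalizing g with
  | nil => exact ⟨rfl, fun _ => rfl⟩
  | cons p t ih =>
    exact pvShape_trans (pvShape_zero g p.1 p.2) (by simpa [pvZeroAll] using ih (pvZero g p.1 p.2))

theorem pvCell_zeroAll {G : List (List Int)} {R : List (Int × Int)} {q : Int × Int}
    (hR : ∀ p ∈ R, pvRoll G p) (hq : pvInB G q) :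
    pvCell (pvZeroAll G R) q = if q ∈ R then 0 else pvCell G q := by
  induction R using List.reverseRecOn with
  | nil => simp [pvZeroAll]
  | append_singleton R p ih =>
    rw [pvZeroAll_append, pvZeroAll_singleton]
    have hp : pvRoll G p := hR p (by simp)
    have hshape := pvShape_zeroAll G R
    have hp' : pvInB (pvZeroAll G R) p := (pvInB_congr hshape).mp hp.1
    have hq' : pvInB (pvZeroAll G R) q := (pvInB_congr hshape).mp hq
    rw [pvCell_zero hp' hq', ih (fun x hx => hR x (by simp [hx]))]
    by_cases hqp : q = p
    · subst hqp; simp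
    · simp [List.mem_append, hqp]

theorem pvGoMono {g g' : List (List Int)} {r c : Int}
    (hs : pvSameShape g g') (hv : ∀ q, pvInB g q → pvCell g' q ≤ pvCell g q) :
    ∀ (dirs : List (Int × Int)) (cnt cnt' : Int), cnt' ≤ cnt →
      isAccGo g r c dirs cnt = true → isAccGo g' r c dirs cnt' = true := by
  intro dirs
  induction dirs with
  | nil => intro cnt cnt' _ _; simp [isAccGo]
  | cons d rest ih =>
    intro cnt cnt' hle hgo
    have e1 : (g.length : Int) = (g'.length : Int) := by exact_mod_cast hs.1
    have e2 : ((pvRowAt g (r + d.1)).length : Int) = ((pvRowAt g' (r + d.1)).length : Int) := by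
      exact_mod_cast hs.2 (r + d.1)
    simp only [isAccGo] at hgo ⊢
    by_cases hb : 0 ≤ r + d.1 ∧ r + d.1 < (g.length : Int) ∧ 0 ≤ c + d.2 ∧
        c + d.2 < ((pvRowAt g (r + d.1)).length : Int)
    · have hb' : 0 ≤ r + d.1 ∧ r + d.1 < (g'.length : Int) ∧ 0 ≤ c + d.2 ∧
          c + d.2 < ((pvRowAt g' (r + d.1)).length : Int) := by
        refine ⟨hb.1, ?_, hb.2.2.1, ?_⟩ <;> omega
      rw [if_pos hb] at hgo; rw [if_pos hb']
      have hInB : pvInB g (r + d.1, c + d.2) := hb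
      have hcle := hv _ hInB
      by_cases h4 : 4 ≤ cnt + pvCell g (r + d.1, c + d.2)
      · rw [if_pos h4] at hgo; exact absurd hgo (by simp)
      · rw [if_neg h4] at hgo
        have h4' : ¬ 4 ≤ cnt' + pvCell g' (r + d.1, c + d.2) := by omega
        rw [if_neg h4']
        exact ih _ _ (by omega) hgo
    · have hb' : ¬ (0 ≤ r + d.1 ∧ r + d.1 < (g'.length : Int) ∧ 0 ≤ c + d.2 ∧
          c + d.2 < ((pvRowAt g' (r + d.1)).length : Int)) := by
        intro hx; exact hb ⟨hx.1, by omega, hx.2.2.1, by omega⟩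
      rw [if_neg hb] at hgo; rw [if_neg hb']
      exact ih _ _ hle hgo

theorem pvAcc_mono {G : List (List Int)} {R R' : List (Int × Int)}
    (hR : ∀ p ∈ R, pvRoll G p) (hR' : ∀ p ∈ R', pvRoll G p)
    (hsub : ∀ x ∈ R, x ∈ R') (q : Int × Int)
    (h : is_accessible (pvZeroAll G R) q.1 q.2 = true) :
    is_accessible (pvZeroAll G R') q.1 q.2 = true := by
  unfold is_accessible at h ⊢
  refine pvGoMono ?_ ?_ pvDirs 0 0 le_rfl h
  · exact pvShape_trans (pvShape_symm (pvShape_zeroAll G R)) (pvShape_zeroAll G R')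
  · intro x hx
    have hxG : pvInB G x := (pvInB_congr (pvShape_zeroAll G R)).mpr hx
    rw [pvCell_zeroAll hR hxG, pvCell_zeroAll hR' hxG]
    by_cases h1 : x ∈ R'
    · rw [if_pos h1]
      by_cases h2 : x ∈ R
      · simp [h2]
      · rw [if_neg h2]; have := (hR' x h1).2; omega
    · have h2 : x ∉ R := fun hx2 => h1 (hsub x hx2)
      simp [h1, h2]

theorem pvGoCong {g g' : List (List Int)} {r c : Int} :
    ∀ (dirs : List (Int × Int)), pvSameShape g g' →
    (∀ d ∈ dirs, pvInB g (r + d.1, c + d.2) →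
      pvCell g (r + d.1, c + d.2) = pvCell g' (r + d.1, c + d.2)) →
    ∀ cnt, isAccGo g r c dirs cnt = isAccGo g' r c dirs cnt := by
  intro dirs
  induction dirs with
  | nil => intro _ _ _; simp [isAccGo]
  | cons d rest ih =>
    intro hs hv cnt
    have e1 : (g.length : Int) = (g'.length : Int) := by exact_mod_cast hs.1
    have e2 : ((pvRowAt g (r + d.1)).length : Int) = ((pvRowAt g' (r + d.1)).length : Int) := by
      exact_mod_cast hs.2 (r + d.1)
    simp only [isAccGo]
    by_cases hb : 0 ≤ r + d.1 ∧ r + d.1 < (g.length : Int) ∧ 0 ≤ c + d.2 ∧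
        c + d.2 < ((pvRowAt g (r + d.1)).length : Int)
    · have hb' : 0 ≤ r + d.1 ∧ r + d.1 < (g'.length : Int) ∧ 0 ≤ c + d.2 ∧
          c + d.2 < ((pvRowAt g' (r + d.1)).length : Int) := by
        refine ⟨hb.1, ?_, hb.2.2.1, ?_⟩ <;> omega
      rw [if_pos hb, if_pos hb']
      have hcell : pvCell g (r + d.1, c + d.2) = pvCell g' (r + d.1, c + d.2) :=
        hv d (by simp) hb
      rw [← hcell]
      by_cases h4 : 4 ≤ cnt + pvCell g (r + d.1, c + d.2)
      · rw [if_pos h4, if_pos h4]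
      · rw [if_neg h4, if_neg h4]
        exact ih hs (fun x hx => hv x (by simp [hx])) _
    · have hb' : ¬ (0 ≤ r + d.1 ∧ r + d.1 < (g'.length : Int) ∧ 0 ≤ c + d.2 ∧
          c + d.2 < ((pvRowAt g' (r + d.1)).length : Int)) := by
        intro hx; exact hb ⟨hx.1, by omega, hx.2.2.1, by omega⟩
      rw [if_neg hb, if_neg hb']
      exact ih hs (fun x hx => hv x (by simp [hx])) _

theorem pvAcc_zero_ne {g : List (List Int)} {p q : Int × Int}
    (hp : pvInB g p)
    (hne : ∀ d ∈ pvDirs, (q.1 + d.1, q.2 + d.2) ≠ p) :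
    is_accessible (pvZero g p.1 p.2) q.1 q.2 = is_accessible g q.1 q.2 := by
  unfold is_accessible
  refine (pvGoCong pvDirs (pvShape_zero g p.1 p.2) ?_ 0).symm
  intro d hd hInB
  rw [pvCell_zero hp hInB, if_neg (hne d hd)]

theorem pvDirs_neg : ∀ d ∈ pvDirs, ((-d.1, -d.2)) ∈ pvDirs := by decide

theorem pvReach_sound {G : List (List Int)} {R : List (Int × Int)} (h : pvReach G R) :
    pvSound G R := by
  induction h with
  | nil => exact ⟨List.nodup_nil, by simp⟩
  | snoc h hroll hnm hacc ih =>
    refine ⟨?_, ?_⟩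
    · rw [List.nodup_append]
      refine ⟨ih.1, List.nodup_singleton _, ?_⟩
      intro a ha b hb
      simp at hb; subst hb
      intro hab; subst hab; exact hnm ha
    · intro x hx
      rcases List.mem_append.mp hx with hx | hx
      · exact ih.2 x hx
      · simp at hx; subst hx; exact hroll

theorem pvReach_wave {G : List (List Int)} :
    ∀ (w : List (Int × Int)) {R : List (Int × Int)}, pvReach G R → w.Nodup →
    (∀ p ∈ w, pvRoll G p ∧ p ∉ R ∧ is_accessible (pvZeroAll G R) p.1 p.2 = true) →
    pvReach G (R ++ w) := by
  intro w
  induction w with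
  | nil => intro R hR _ _; simpa using hR
  | cons p t ih =>
    intro R hR hnd hw
    have hp := hw p (by simp)
    have hRs := pvReach_sound hR
    have hR' : pvReach G (R ++ [p]) := pvReach.snoc hR hp.1 hp.2.1 hp.2.2
    have hR's := pvReach_sound hR'
    have step := ih hR' (by simpa using hnd.of_cons) ?_
    · simpa [List.append_assoc] using step
    · intro x hx
      have hxw := hw x (by simp [hx])
      refine ⟨hxw.1, ?_, ?_⟩
      · intro hmem
        rcases List.mem_append.mp hmem with h1 | h1
        · exact hxw.2.1 h1
        · simp at h1; subst h1
          exact (List.nodup_cons.mp hnd).1 hx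
      · exact pvAcc_mono hRs.2 hR's.2 (fun y hy => List.mem_append.mpr (Or.inl hy)) x hxw.2.2

theorem pvReach_subset_final {G : List (List Int)} {R T : List (Int × Int)}
    (hR : pvReach G R) (hT : pvFinal G T) : ∀ p ∈ R, p ∈ T := by
  induction hR with
  | nil => simp
  | @snoc R' p h hroll hnm hacc ih =>
    intro x hx
    rcases List.mem_append.mp hx with hx | hx
    · exact ih x hx
    · simp at hx; subst hx
      by_contra hxT
      have hsound := pvReach_sound h
      have : is_accessible (pvZeroAll G T) x.1 x.2 = true :=
        pvAcc_mono hsound.2 hT.1.2 ih x hacc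
      rw [hT.2 x hroll hxT] at this
      exact absurd this (by simp)

theorem pvAccOf_eq (mg : List (List Int)) (rolls : List (Int × Int)) :
    pvAccOf mg rolls = rolls.filter (fun p => is_accessible mg p.1 p.2) := by
  simpa [pvAccOf] using
    PySem.List.foldl_append_if_eq_filter (fun p : Int × Int => is_accessible mg p.1 p.2) rolls []

theorem pvRemoveAll_nodup : ∀ (ps rolls : List (Int × Int)), rolls.Nodup →
    (pvRemoveAll rolls ps).Nodup := by
  intro ps
  induction ps with
  | nil => intro rolls h; exact h
  | cons x t ih =>
    intro rolls h
    have e : pvRemoveAll rolls (x :: t) = pvRemoveAll (PySem.Set.discard rolls x) t := rfl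
    rw [e]
    exact ih _ (PySem.Set.nodup_discard _ _ h)

theorem pvMem_removeAll : ∀ (ps rolls : List (Int × Int)) (q : Int × Int),
    q ∈ pvRemoveAll rolls ps ↔ q ∈ rolls ∧ q ∉ ps := by
  intro ps
  induction ps with
  | nil => intro rolls q; simp [pvRemoveAll]
  | cons x t ih =>
    intro rolls q
    have : pvRemoveAll rolls (x :: t) = pvRemoveAll (PySem.Set.discard rolls x) t := rfl
    rw [this, ih]
    rw [PySem.Set.mem_discard]
    simp only [List.mem_cons]
    constructor
    · rintro ⟨⟨h1, h2⟩, h3⟩; exact ⟨h1, by rintro (h | h) <;> [exact h2 h; exact h3 h]⟩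
    · rintro ⟨h1, h2⟩; exact ⟨⟨h1, fun h => h2 (Or.inl h)⟩, fun h => h2 (Or.inr h)⟩

theorem pvALoop_spec (G : List (List Int)) :
    ∀ (mg : List (List Int)) (rolls : List (Int × Int)) (total : Int),
    ∀ R, pvReach G R → mg = pvZeroAll G R →
      rolls.Nodup → (∀ p, p ∈ rolls ↔ (pvRoll G p ∧ p ∉ R)) → total = (R.length : Int) →
      ∃ T, pvReach G T ∧ pvFinal G T ∧ aLoop mg rolls total = (T.length : Int) := by
  intro mg rolls total
  induction mg, rolls, total using aLoop.induct with
  | case1 mg total =>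
    intro R hReach hmg hnd hchar htot
    refine ⟨R, hReach, ⟨pvReach_sound hReach, ?_⟩, ?_⟩
    · intro p hroll hnR
      exact absurd ((hchar p).mpr ⟨hroll, hnR⟩) (by simp)
    · rw [aLoop]; simpa using htot
  | case2 mg rolls total hne acc hacc0 =>
    simp only [acc] at hacc0
    intro R hReach hmg hnd hchar htot
    refine ⟨R, hReach, ⟨pvReach_sound hReach, ?_⟩, ?_⟩
    · intro p hroll hnR
      have hmem : p ∈ rolls := (hchar p).mpr ⟨hroll, hnR⟩
      have := List.filter_eq_nil_iff.mp (by rw [← pvAccOf_eq mg rolls]; exact hacc0) p hmem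
      rw [hmg] at this
      simpa using this
    · rw [aLoop, if_neg hne]
      simp only [hacc0, if_pos rfl]  -- placeholder, fixed below if needed
      simpa using htot
  | case3 mg rolls total hne acc haccne ih =>
    simp only [acc] at haccne ih
    intro R hReach hmg hnd hchar htot
    have hRsound := pvReach_sound hReach
    have hfil := pvAccOf_eq mg rolls
    have haccnd : (pvAccOf mg rolls).Nodup := by rw [hfil]; exact hnd.filter _
    have hw : ∀ p ∈ pvAccOf mg rolls, pvRoll G p ∧ p ∉ R ∧
        is_accessible (pvZeroAll G R) p.1 p.2 = true := by
      intro p hp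
      rw [hfil, List.mem_filter] at hp
      have h1 := (hchar p).mp hp.1
      exact ⟨h1.1, h1.2, by rw [← hmg]; exact hp.2⟩
    have hReach' : pvReach G (R ++ pvAccOf mg rolls) := pvReach_wave _ hReach haccnd hw
    have hR'sound := pvReach_sound hReach'
    obtain ⟨T, hT1, hT2, hT3⟩ := ih (R ++ pvAccOf mg rolls) hReach'
      (by rw [hmg, ← pvZeroAll_append])
      (pvRemoveAll_nodup _ _ hnd)
      (by
        intro p
        rw [pvMem_removeAll, hchar]
        constructor
        · rintro ⟨⟨h1, h2⟩, h3⟩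
          refine ⟨h1, ?_⟩
          intro hmem
          rcases List.mem_append.mp hmem with h | h
          · exact h2 h
          · exact h3 h
        · rintro ⟨h1, h2⟩
          refine ⟨⟨h1, fun h => h2 (List.mem_append.mpr (Or.inl h))⟩,
            fun h => h2 (List.mem_append.mpr (Or.inr h))⟩)
      (by rw [htot, List.length_append]; push_cast; ring)
    refine ⟨T, hT1, hT2, ?_⟩
    rw [aLoop, if_neg hne]
    simp only [dif_neg haccne]
    exact hT3

theorem pv_pyIdx_neg_one {n : Nat} (h : 0 < n) :
    PySem.List.pyIdx? n (-1) = some (n - 1) := by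
  unfold PySem.List.pyIdx?
  rw [if_neg (by norm_num), if_pos (by omega)]
  norm_num

theorem pv_pop_none {α : Type} {stack : List α} (h : PySem.List.pop? stack = none) :
    stack = [] := by
  cases stack with
  | nil => rfl
  | cons a t =>
    exfalso
    unfold PySem.List.pop? at h
    rw [pv_pyIdx_neg_one (by simp)] at h
    simp only [Option.bind_some] at h
    have hlt : (a :: t).length - 1 < (a :: t).length := by simp
    rw [List.getElem?_eq_getElem hlt] at h
    simp at h

theorem pv_pop_some {α : Type} {stack rest : List α} {p : α}
    (h : PySem.List.pop? stack = some (p, rest)) : stack = rest ++ [p] := by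
  cases stack with
  | nil => simp [PySem.List.pop?, PySem.List.pyIdx?] at h
  | cons a t =>
    unfold PySem.List.pop? at h
    rw [pv_pyIdx_neg_one (by simp)] at h
    simp only [Option.bind_some] at h
    have hlt : (a :: t).length - 1 < (a :: t).length := by simp
    rw [List.getElem?_eq_getElem hlt] at h
    simp only [Option.map_some, Option.some.injEq, Prod.mk.injEq] at h
    obtain ⟨h1, h2⟩ := h
    have hne : (a :: t) ≠ [] := by simp
    calc a :: t = (a :: t).dropLast ++ [(a :: t).getLast hne] :=
          (List.dropLast_append_getLast hne).symm
      _ = rest ++ [p] := by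
          rw [← h2, List.eraseIdx_length_sub_one, ← h1, List.getLast_eq_getElem]

theorem pv_mem_push (g' : List (List Int)) (p : Int × Int) :
    ∀ (l : List (Int × Int)) (s : List (Int × Int)) (q : Int × Int),
      (q ∈ l.foldl (fun s d =>
          have nr := p.1 + d.1
          have nc := p.2 + d.2
          if _h : 0 ≤ nr ∧ nr < (g'.length : Int) ∧ 0 ≤ nc ∧ nc < ((pvRowAt g' nr).length : Int) ∧
              pvCell g' (nr, nc) = 1 then
            s ++ [(nr, nc)]
          else s) s)
      ↔ (q ∈ s ∨ ∃ d ∈ l, q = (p.1 + d.1, p.2 + d.2) ∧ pvInB g' q ∧ pvCell g' q = 1) := by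
  intro l
  induction l with
  | nil => intro s q; simp
  | cons d t ih =>
    intro s q
    rw [List.foldl_cons]
    by_cases hC : 0 ≤ p.1 + d.1 ∧ p.1 + d.1 < (g'.length : Int) ∧ 0 ≤ p.2 + d.2 ∧
        p.2 + d.2 < ((pvRowAt g' (p.1 + d.1)).length : Int) ∧ pvCell g' (p.1 + d.1, p.2 + d.2) = 1
    · rw [dif_pos hC, ih, List.mem_append, List.mem_singleton]
      constructor
      · rintro ((h | h) | ⟨d₀, hd₀, h⟩)
        · exact Or.inl h
        · subst h
          exact Or.inr ⟨d, List.mem_cons_self, rfl, ⟨hC.1, hC.2.1, hC.2.2.1, hC.2.2.2.1⟩, hC.2.2.2.2⟩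
        · exact Or.inr ⟨d₀, List.mem_cons_of_mem _ hd₀, h⟩
      · rintro (h | ⟨d₀, hd₀, h⟩)
        · exact Or.inl (Or.inl h)
        · rcases List.mem_cons.mp hd₀ with hd₀ | hd₀
          · subst hd₀; exact Or.inl (Or.inr h.1)
          · exact Or.inr ⟨d₀, hd₀, h⟩
    · rw [dif_neg hC, ih]
      constructor
      · rintro (h | ⟨d₀, hd₀, h⟩)
        · exact Or.inl h
        · exact Or.inr ⟨d₀, List.mem_cons_of_mem _ hd₀, h⟩
      · rintro (h | ⟨d₀, hd₀, h⟩)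
        · exact Or.inl h
        · rcases List.mem_cons.mp hd₀ with hd₀ | hd₀
          · exfalso
            subst hd₀
            obtain ⟨heq, hInB, hcell⟩ := h
            apply hC
            subst heq
            exact ⟨hInB.1, hInB.2.1, hInB.2.2.1, hInB.2.2.2, hcell⟩
          · exact Or.inr ⟨d₀, hd₀, h⟩

theorem pvBLoop_spec (G : List (List Int)) :
    ∀ (g : List (List Int)) (stack : List (Int × Int)) (removed : Int),
    ∀ R, pvReach G R → g = pvZeroAll G R →
      (∀ q ∈ stack, pvRoll G q) →
      (∀ q, pvRoll G q → q ∉ R → is_accessible g q.1 q.2 = true → q ∈ stack) →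
      removed = (R.length : Int) →
      ∃ T, pvReach G T ∧ pvFinal G T ∧ bLoop g stack removed = (T.length : Int) := by
  intro g stack removed
  induction g, stack, removed using bLoop.induct with
  | case1 g stack removed hpop =>
    intro R hReach hg hselem hsmem hrem
    have hstack : stack = [] := pv_pop_none hpop
    subst hstack
    refine ⟨R, hReach, ⟨pvReach_sound hReach, ?_⟩, ?_⟩
    · intro p hroll hnR
      by_contra hne
      simp only [Bool.not_eq_false] at hne
      have : p ∈ ([] : List (Int × Int)) := hsmem p hroll hnR (by rw [hg]; exact hne)
      simp at this
    · rw [bLoop, hpop]; exact hrem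
  | case2 g stack removed p rest hpop hc g' ih =>
    intro R hReach hg hselem hsmem hrem
    have hstack := pv_pop_some hpop
    have hpRoll : pvRoll G p := hselem p (by rw [hstack]; simp)
    have hRsound := pvReach_sound hReach
    have hpInBG : pvInB G p := hpRoll.1
    have hpR : p ∉ R := by
      intro hmem
      have hcell := hc.1
      rw [hg, pvCell_zeroAll hRsound.2 hpInBG, if_pos hmem] at hcell
      norm_num at hcell
    have hacc : is_accessible (pvZeroAll G R) p.1 p.2 = true := by rw [← hg]; exact hc.2
    have hReach' : pvReach G (R ++ [p]) := pvReach.snoc hReach hpRoll hpR hacc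
    have hR'sound := pvReach_sound hReach'
    have hg' : g' = pvZeroAll G (R ++ [p]) := by
      simp only [g']
      rw [hg, pvZeroAll_append, pvZeroAll_singleton]
    have hshape' : pvSameShape G g' := by rw [hg']; exact pvShape_zeroAll G _
    have hshape : pvSameShape G g := by rw [hg]; exact pvShape_zeroAll G R
    obtain ⟨T, hT1, hT2, hT3⟩ := ih (R ++ [p]) hReach' hg'
      (by
        intro q hq
        rw [pv_mem_push] at hq
        rcases hq with hq | ⟨d₀, hd₀, hqeq, hInB, hcell⟩
        · exact hselem q (by rw [hstack]; exact List.mem_append.mpr (Or.inl hq))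
        · have hInBG : pvInB G q := (pvInB_congr hshape').mpr hInB
          rw [hg', pvCell_zeroAll hR'sound.2 hInBG] at hcell
          by_cases hqm : q ∈ R ++ [p]
          · rw [if_pos hqm] at hcell; norm_num at hcell
          · rw [if_neg hqm] at hcell; exact ⟨hInBG, hcell⟩)
      (by
        intro q hqRoll hqR' hqacc
        rw [pv_mem_push]
        have hqInBG : pvInB G q := hqRoll.1
        by_cases hold : is_accessible g q.1 q.2 = true
        · have hqstack : q ∈ stack := hsmem q hqRoll
            (fun hm => hqR' (List.mem_append.mpr (Or.inl hm))) hold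
          rw [hstack, List.mem_append, List.mem_singleton] at hqstack
          rcases hqstack with hq | hq
          · exact Or.inl hq
          · exact absurd (hq ▸ List.mem_append.mpr (Or.inr (List.mem_singleton.mpr rfl)))
              hqR'
        · by_cases hnb : ∀ d ∈ pvDirs, (q.1 + d.1, q.2 + d.2) ≠ p
          · exfalso
            have hInBgp : pvInB g p := (pvInB_congr hshape).mp hpInBG
            have := pvAcc_zero_ne hInBgp hnb
            have heq : is_accessible g' q.1 q.2 = is_accessible g q.1 q.2 := this
            rw [heq] at hqacc
            exact hold hqacc
          · push_neg at hnb
            obtain ⟨d, hd, heq⟩ := hnb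
            refine Or.inr ⟨(-d.1, -d.2), pvDirs_neg d hd, ?_, ?_, ?_⟩
            · have h1 : q.1 + d.1 = p.1 := congrArg Prod.fst heq
              have h2 : q.2 + d.2 = p.2 := congrArg Prod.snd heq
              have : q = (q.1, q.2) := rfl
              rw [this]
              refine Prod.ext ?_ ?_ <;> simp <;> omega
            · exact (pvInB_congr hshape').mp hqInBG
            · rw [hg', pvCell_zeroAll hR'sound.2 hqInBG, if_neg hqR']
              exact hqRoll.2)
      (by rw [hrem, List.length_append]; push_cast; simp)
    refine ⟨T, hT1, hT2, ?_⟩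
    rw [bLoop.eq_def, hpop]
    simp only [dif_pos hc]
    exact hT3
  | case3 g stack removed p rest hpop hc ih =>
    intro R hReach hg hselem hsmem hrem
    have hstack := pv_pop_some hpop
    have hRsound := pvReach_sound hReach
    obtain ⟨T, hT1, hT2, hT3⟩ := ih R hReach hg
      (fun q hq => hselem q (by rw [hstack]; exact List.mem_append.mpr (Or.inl hq)))
      (by
        intro q hqRoll hqR hqacc
        have hqstack : q ∈ stack := hsmem q hqRoll hqR hqacc
        rw [hstack, List.mem_append, List.mem_singleton] at hqstack
        rcases hqstack with hq | hq
        · exact hq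
        · exfalso
          subst hq
          apply hc
          refine ⟨?_, hqacc⟩
          rw [hg, pvCell_zeroAll hRsound.2 hqRoll.1, if_neg hqR]
          exact hqRoll.2)
      hrem
    refine ⟨T, hT1, hT2, ?_⟩
    rw [bLoop.eq_def, hpop]
    simp only [dif_neg hc]
    exact hT3

theorem pv_mem_addfold (mg : List (List Int)) (r : Int) :
    ∀ (cs : List Int) (s : List (Int × Int)) (q : Int × Int),
    (q ∈ cs.foldl (fun s c => if pvCell mg (r, c) = 1 then PySem.Set.add s (r, c) else s) s) ↔
      (q ∈ s ∨ ∃ c ∈ cs, pvCell mg (r, c) = 1 ∧ q = (r, c)) := by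
  intro cs
  induction cs with
  | nil => intro s q; simp
  | cons c t ih =>
    intro s q
    rw [List.foldl_cons]
    by_cases hC : pvCell mg (r, c) = 1
    · rw [if_pos hC, ih, PySem.Set.mem_add]
      constructor
      · rintro ((h | h) | ⟨c₀, hc₀, h⟩)
        · exact Or.inl h
        · exact Or.inr ⟨c, List.mem_cons_self, hC, h⟩
        · exact Or.inr ⟨c₀, List.mem_cons_of_mem _ hc₀, h⟩
      · rintro (h | ⟨c₀, hc₀, h⟩)
        · exact Or.inl (Or.inl h)
        · rcases List.mem_cons.mp hc₀ with hc₀ | hc₀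
          · subst hc₀; exact Or.inl (Or.inr h.2)
          · exact Or.inr ⟨c₀, hc₀, h⟩
    · rw [if_neg hC, ih]
      constructor
      · rintro (h | ⟨c₀, hc₀, h⟩)
        · exact Or.inl h
        · exact Or.inr ⟨c₀, List.mem_cons_of_mem _ hc₀, h⟩
      · rintro (h | ⟨c₀, hc₀, h⟩)
        · exact Or.inl h
        · rcases List.mem_cons.mp hc₀ with hc₀ | hc₀
          · exfalso; subst hc₀; exact hC h.1
          · exact Or.inr ⟨c₀, hc₀, h⟩

theorem pv_nodup_addfold (mg : List (List Int)) (r : Int) :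
    ∀ (cs : List Int) (s : List (Int × Int)), s.Nodup →
    (cs.foldl (fun s c => if pvCell mg (r, c) = 1 then PySem.Set.add s (r, c) else s) s).Nodup := by
  intro cs
  induction cs with
  | nil => intro s h; exact h
  | cons c t ih =>
    intro s h
    rw [List.foldl_cons]
    by_cases hC : pvCell mg (r, c) = 1
    · rw [if_pos hC]; exact ih _ (PySem.Set.nodup_add _ _ h)
    · rw [if_neg hC]; exact ih _ h

theorem pv_mem_rollsbuild (mg : List (List Int)) :
    ∀ (rs : List Int) (s : List (Int × Int)) (q : Int × Int),
    (q ∈ rs.foldl (fun s r =>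
        (PySem.List.pyRange 0 ((pvRowAt mg r).length : Int) 1).foldl
          (fun s c => if pvCell mg (r, c) = 1 then PySem.Set.add s (r, c) else s) s) s) ↔
      (q ∈ s ∨ ∃ r ∈ rs, ∃ c, 0 ≤ c ∧ c < ((pvRowAt mg r).length : Int) ∧
        pvCell mg (r, c) = 1 ∧ q = (r, c)) := by
  intro rs
  induction rs with
  | nil => intro s q; simp
  | cons r t ih =>
    intro s q
    rw [List.foldl_cons, ih, pv_mem_addfold]
    constructor
    · rintro ((h | ⟨c, hc, h1, h2⟩) | ⟨r₀, hr₀, h⟩)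
      · exact Or.inl h
      · exact Or.inr ⟨r, List.mem_cons_self, c,
          (PySem.List.mem_pyRange_one.mp hc).1, (PySem.List.mem_pyRange_one.mp hc).2, h1, h2⟩
      · exact Or.inr ⟨r₀, List.mem_cons_of_mem _ hr₀, h⟩
    · rintro (h | ⟨r₀, hr₀, c, hc1, hc2, h1, h2⟩)
      · exact Or.inl (Or.inl h)
      · rcases List.mem_cons.mp hr₀ with hr₀ | hr₀
        · subst hr₀
          exact Or.inl (Or.inr ⟨c, PySem.List.mem_pyRange_one.mpr ⟨hc1, hc2⟩, h1, h2⟩)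
        · exact Or.inr ⟨r₀, hr₀, c, hc1, hc2, h1, h2⟩

theorem pv_nodup_rollsbuild (mg : List (List Int)) :
    ∀ (rs : List Int) (s : List (Int × Int)), s.Nodup →
    (rs.foldl (fun s r =>
        (PySem.List.pyRange 0 ((pvRowAt mg r).length : Int) 1).foldl
          (fun s c => if pvCell mg (r, c) = 1 then PySem.Set.add s (r, c) else s) s) s).Nodup := by
  intro rs
  induction rs with
  | nil => intro s h; exact h
  | cons r t ih =>
    intro s h
    rw [List.foldl_cons]
    exact ih _ (pv_nodup_addfold mg r _ s h)

theorem pv_rolls_char (mg : List (List Int)) (q : Int × Int) :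
    (q ∈ (PySem.List.pyRange 0 (mg.length : Int) 1).foldl (fun s r =>
        (PySem.List.pyRange 0 ((pvRowAt mg r).length : Int) 1).foldl
          (fun s c => if pvCell mg (r, c) = 1 then PySem.Set.add s (r, c) else s) s)
        PySem.Set.empty) ↔ pvRoll mg q := by
  rw [pv_mem_rollsbuild]
  constructor
  · rintro (h | ⟨r, hr, c, hc1, hc2, h1, h2⟩)
    · simp [PySem.Set.empty] at h
    · subst h2
      have hr' := PySem.List.mem_pyRange_one.mp hr
      exact ⟨⟨hr'.1, hr'.2, hc1, hc2⟩, h1⟩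
  · rintro ⟨⟨h1, h2, h3, h4⟩, h5⟩
    refine Or.inr ⟨q.1, PySem.List.mem_pyRange_one.mpr ⟨h1, h2⟩, q.2, h3, h4, ?_, rfl⟩
    simpa using h5

theorem pv_stack_char (g : List (List Int)) (q : Int × Int) :
    (q ∈ (PySem.List.pyRange 0 (g.length : Int) 1).flatMap (fun r =>
        (PySem.List.pyRange 0 ((pvRowAt g r).length : Int) 1).flatMap (fun c =>
          if pvCell g (r, c) = 1 then [(r, c)] else []))) ↔ pvRoll g q := by
  rw [List.mem_flatMap]
  constructor
  · rintro ⟨r, hr, h⟩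
    rw [List.mem_flatMap] at h
    obtain ⟨c, hc, h⟩ := h
    have hr' := PySem.List.mem_pyRange_one.mp hr
    have hc' := PySem.List.mem_pyRange_one.mp hc
    by_cases h1 : pvCell g (r, c) = 1
    · rw [if_pos h1] at h
      simp at h
      subst h
      exact ⟨⟨hr'.1, hr'.2, hc'.1, hc'.2⟩, h1⟩
    · rw [if_neg h1] at h
      simp at h
  · rintro ⟨⟨h1, h2, h3, h4⟩, h5⟩
    refine ⟨q.1, PySem.List.mem_pyRange_one.mpr ⟨h1, h2⟩, ?_⟩
    rw [List.mem_flatMap]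
    refine ⟨q.2, PySem.List.mem_pyRange_one.mpr ⟨h3, h4⟩, ?_⟩
    rw [if_pos (by simpa using h5)]
    simp

theorem pv_main : ∀ grid, count_removable_rolls grid = count_removable_rolls_alt grid := by
  intro grid
  by_cases hg : grid = []
  · subst hg; rfl
  · unfold count_removable_rolls count_removable_rolls_alt
    rw [if_neg hg, if_neg hg]
    have hmap : grid.map (fun row => PySem.List.slice row none none) = grid := by
      simp [PySem.List.slice_none_none]
    simp only [hmap]
    obtain ⟨TA, hTA1, hTA2, hTA3⟩ := pvALoop_spec grid grid
      ((PySem.List.pyRange 0 (grid.length : Int) 1).foldl (fun s r =>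
        (PySem.List.pyRange 0 ((pvRowAt grid r).length : Int) 1).foldl
          (fun s c => if pvCell grid (r, c) = 1 then PySem.Set.add s (r, c) else s) s)
        PySem.Set.empty) 0 [] pvReach.nil rfl
      (pv_nodup_rollsbuild grid _ _ List.nodup_nil)
      (fun p => by rw [pv_rolls_char]; simp)
      (by simp)
    obtain ⟨TB, hTB1, hTB2, hTB3⟩ := pvBLoop_spec grid grid
      ((PySem.List.pyRange 0 (grid.length : Int) 1).flatMap (fun r =>
        (PySem.List.pyRange 0 ((pvRowAt grid r).length : Int) 1).flatMap (fun c =>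
          if pvCell grid (r, c) = 1 then [(r, c)] else []))) 0 [] pvReach.nil rfl
      (fun q hq => (pv_stack_char grid q).mp hq)
      (fun q hroll _ _ => (pv_stack_char grid q).mpr hroll)
      (by simp)
    rw [hTA3, hTB3]
    have hperm : TA.Perm TB := by
      rw [List.perm_ext_iff_of_nodup (pvReach_sound hTA1).1 (pvReach_sound hTB1).1]
      intro a
      exact ⟨fun h => pvReach_subset_final hTA1 hTB2 a h,
        fun h => pvReach_subset_final hTB1 hTA2 a h⟩
    rw [hperm.length_eq]

-- ===== VERDICT (by name: the statement is the Claim_ definition above) =====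
theorem count_removable_rolls_spec : Claim_equal_count_removable_rolls := by
  intro grid _
  unfold Spec_count_removable_rolls
  exact pv_main grid
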